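-- pv_equiv track=rewrite | github.com/JainRecipes/RecipeGPT | app.py | findIngredients
-- ===== SOURCE A (Python) =====
-- def findIngredients(data):
--     # creates a set
--     all_ingredients = set()
--     for recipe in data:
--         # gets all the ingredients
--         ingredients = recipe.get('ingredients')
--         if ingredients:
--             for ingredient in ingredients:
--                 lowercase_ingredient = ingredient.lower()
--                 all_ingredients.add(lowercase_ingredient.capitalize())
--
--     # gets rid of any exact duplicates
--     ingredients = list(all_ingredients)
--     # alphabetizes
--     ingredients.sort()
--     return ingredients
-- ===== SOURCE B (Python) =====
-- def findIngredients(data):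
--     # collect every transformed ingredient (duplicates included)
--     items = []
--     for recipe in data:
--         ingredients = recipe.get('ingredients')
--         if ingredients:
--             for ingredient in ingredients:
--                 items.append(ingredient.lower().capitalize())
--     # sort the full multiset, then drop duplicates by adjacency
--     items.sort()
--     result = []
--     for x in items:
--         if not result or result[-1] != x:
--             result.append(x)
--     return result
-- ===== Notes on version B (the rewrite author's own statement) =====
-- stated objective: alternative
-- what changed: Deduplicates by sorting the full multiset of transformed ingredients and keeping one element per adjacent run, instead of building a set and sorting its elements.
import Mathlib
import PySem

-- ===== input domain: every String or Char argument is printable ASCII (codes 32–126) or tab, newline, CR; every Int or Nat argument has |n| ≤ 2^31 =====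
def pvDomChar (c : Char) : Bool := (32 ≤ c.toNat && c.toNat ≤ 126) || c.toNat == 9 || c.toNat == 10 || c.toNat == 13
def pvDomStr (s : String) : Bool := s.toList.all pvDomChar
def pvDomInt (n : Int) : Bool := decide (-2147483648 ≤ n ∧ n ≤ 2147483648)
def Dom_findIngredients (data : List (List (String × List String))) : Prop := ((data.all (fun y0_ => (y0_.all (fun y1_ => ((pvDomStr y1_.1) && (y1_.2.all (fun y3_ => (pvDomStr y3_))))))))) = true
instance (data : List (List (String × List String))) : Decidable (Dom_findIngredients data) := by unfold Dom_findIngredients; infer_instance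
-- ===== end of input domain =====

-- B deduplicates by sorting the full multiset and keeping one element per adjacent run,
-- instead of A's set-then-sort; same cost, different pass structure.

-- s.capitalize(): first char uppercased, the rest lowercased — hand port, exact on ASCII
def pyCapitalize (s : String) : String :=
  match s.toList with
  | [] => s
  | c :: cs => String.ofList (PySem.Chars.upperChar c :: PySem.Chars.lower cs)

-- ===== PORT A =====
def findIngredients (data : List (List (String × List String))) : List String :=
  let allIngredients : PySem.Set String :=
    data.foldl (fun allIngredients recipe =>
      match (PySem.Dict.mk recipe).get? "ingredients" with
      | some ings =>
          if ings ≠ [] then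
            ings.foldl (fun s ingredient =>
              PySem.Set.add s (pyCapitalize (PySem.Str.lower ingredient))) allIngredients
          else allIngredients
      | none => allIngredients) PySem.Set.empty
  PySem.List.sorted (allIngredients : List String) (fun x => x) false

-- ===== PORT B =====
def findIngredients_alt (data : List (List (String × List String))) : List String :=
  let items : List String :=
    data.foldl (fun items recipe =>
      match (PySem.Dict.mk recipe).get? "ingredients" with
      | some ings =>
          if ings ≠ [] then
            ings.foldl (fun acc ingredient =>
              acc ++ [pyCapitalize (PySem.Str.lower ingredient)]) items
          else items
      | none => items) []
  let sortedItems := PySem.List.sorted items (fun x => x) false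
  sortedItems.foldl (fun res x =>
    if res = [] ∨ PySem.List.pyGet? res (-1) ≠ some x then res ++ [x] else res) []

-- ===== PRECONDITION & SPEC =====
def Spec_findIngredients (data : List (List (String × List String))) (out : List String) : Prop := out = findIngredients_alt data
instance (data : List (List (String × List String))) (out : List String) : Decidable (Spec_findIngredients data out) := by unfold Spec_findIngredients; infer_instance

-- ===== CLAIM (what is proved, stated in full; the proofs are below) =====
def Claim_equal_findIngredients : Prop := ∀ (data : List (List (String × List String))), Dom_findIngredients data → Spec_findIngredients data (findIngredients data)

-- ===== LEMMAS AND PROOFS =====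

-- the flat multiset of transformed ingredients (proof-side characterisation of both folds)
def pvFlat (data : List (List (String × List String))) : List String :=
  data.flatMap (fun recipe =>
    match (PySem.Dict.mk recipe).get? "ingredients" with
    | some ings => ings.map (fun i => pyCapitalize (PySem.Str.lower i))
    | none => [])

def aStep (allIngredients : PySem.Set String) (recipe : List (String × List String)) : PySem.Set String :=
  match (PySem.Dict.mk recipe).get? "ingredients" with
  | some ings =>
      if ings ≠ [] then
        ings.foldl (fun s ingredient =>
          PySem.Set.add s (pyCapitalize (PySem.Str.lower ingredient))) allIngredients
      else allIngredients
  | none => allIngredients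

def bStep (items : List String) (recipe : List (String × List String)) : List String :=
  match (PySem.Dict.mk recipe).get? "ingredients" with
  | some ings =>
      if ings ≠ [] then
        ings.foldl (fun acc ingredient =>
          acc ++ [pyCapitalize (PySem.Str.lower ingredient)]) items
      else items
  | none => items

lemma pvFlat_cons (r : List (String × List String)) (rs : List (List (String × List String))) :
    pvFlat (r :: rs) = (match (PySem.Dict.mk r).get? "ingredients" with
      | some ings => ings.map (fun i => pyCapitalize (PySem.Str.lower i))
      | none => []) ++ pvFlat rs := by
  simp [pvFlat]

lemma aset_mem (data : List (List (String × List String))) :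
    ∀ (s : PySem.Set String) (y : String),
      y ∈ data.foldl aStep s ↔ y ∈ s ∨ y ∈ pvFlat data := by
  induction data with
  | nil => simp [pvFlat]
  | cons r rs ih =>
    intro s y
    rw [List.foldl_cons, ih (aStep s r) y, pvFlat_cons]
    cases h : (PySem.Dict.mk r).get? "ingredients" with
    | none => simp [aStep, h]
    | some ings =>
      by_cases hne : ings = []
      · subst hne; simp [aStep, h]
      · simp only [aStep, h, hne, ne_eq, not_false_eq_true, if_true,
          PySem.Set.mem_foldl_add, List.mem_append, List.mem_map]
        constructor
        · rintro ((h | ⟨b, hb, rfl⟩) | h)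
          · exact Or.inl h
          · exact Or.inr (Or.inl ⟨b, hb, rfl⟩)
          · exact Or.inr (Or.inr h)
        · rintro (h | ⟨b, hb, rfl⟩ | h)
          · exact Or.inl (Or.inl h)
          · exact Or.inl (Or.inr ⟨b, hb, rfl⟩)
          · exact Or.inr h

lemma aset_nodup (data : List (List (String × List String))) :
    ∀ (s : PySem.Set String), s.Nodup → (data.foldl aStep s).Nodup := by
  induction data with
  | nil => intro s hs; simpa using hs
  | cons r rs ih =>
    intro s hs
    rw [List.foldl_cons]
    apply ih
    cases h : (PySem.Dict.mk r).get? "ingredients" with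
    | none => simpa [aStep, h] using hs
    | some ings =>
      by_cases hne : ings = []
      · simpa [aStep, h, hne] using hs
      · simp only [aStep, h, hne, ne_eq, not_false_eq_true, if_true]
        clear h hne ih
        induction ings generalizing s with
        | nil => simpa using hs
        | cons i it iih => exact iih _ (PySem.Set.nodup_add _ _ hs)

lemma bitems_eq (data : List (List (String × List String))) :
    ∀ (acc : List String), data.foldl bStep acc = acc ++ pvFlat data := by
  induction data with
  | nil => simp [pvFlat]
  | cons r rs ih =>
    intro acc
    rw [List.foldl_cons, ih (bStep acc r), pvFlat_cons]
    cases h : (PySem.Dict.mk r).get? "ingredients" with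
    | none => simp [bStep, h]
    | some ings =>
      by_cases hne : ings = []
      · subst hne; simp [bStep, h]
      · simp only [bStep, h, hne, ne_eq, not_false_eq_true, if_true,
          PySem.List.foldl_append_singleton_eq_map, List.append_assoc]

lemma le_getLast_of_pairwise_lt {acc : List String} {a b : String}
    (h : acc.Pairwise (· < ·)) (hb : acc.getLast? = some b) (ha : a ∈ acc) : a ≤ b := by
  induction acc with
  | nil => simp at ha
  | cons c t ih =>
    cases t with
    | nil =>
      simp at hb ha; simp [ha, hb]
    | cons d u =>
      rw [List.getLast?_cons_cons] at hb
      rcases List.mem_cons.mp ha with rfl | hat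
      · have hbmem : b ∈ d :: u := List.mem_of_getLast? hb
        exact le_of_lt ((List.pairwise_cons.mp h).1 b hbmem)
      · exact ih (List.pairwise_cons.mp h).2 hb hat

lemma adjFold_spec (g : List String) :
    ∀ (acc : List String), acc.Pairwise (· < ·) →
      g.Pairwise (· ≤ ·) →
      (∀ b, acc.getLast? = some b → ∀ x ∈ g, b ≤ x) →
      (g.foldl (fun res x =>
        if res = [] ∨ PySem.List.pyGet? res (-1) ≠ some x then res ++ [x] else res) acc).Pairwise (· < ·) ∧
      (∀ y, y ∈ g.foldl (fun res x =>
        if res = [] ∨ PySem.List.pyGet? res (-1) ≠ some x then res ++ [x] else res) acc ↔ y ∈ acc ∨ y ∈ g) := by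
  induction g with
  | nil => intro acc hacc _ _; exact ⟨hacc, by simp⟩
  | cons x t ih =>
    intro acc hacc hg hconn
    have hx : ∀ z ∈ t, x ≤ z := (List.pairwise_cons.mp hg).1
    have ht : t.Pairwise (· ≤ ·) := (List.pairwise_cons.mp hg).2
    rw [List.foldl_cons, show PySem.List.pyGet? acc (-1) = acc.getLast? from PySem.List.pyGet?_neg_one acc]
    by_cases hc : acc = [] ∨ acc.getLast? ≠ some x
    · rw [if_pos hc]
      have hlt : ∀ a ∈ acc, a < x := by
        intro a ha
        have hne : acc ≠ [] := List.ne_nil_of_mem ha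
        obtain ⟨b, hb⟩ := Option.isSome_iff_exists.mp (List.getLast?_isSome.mpr hne)
        have hbx : b ≤ x := hconn b hb x (List.mem_cons_self)
        have hbne : b ≠ x := by
          rcases hc with h | h
          · exact absurd h hne
          · intro he; exact h (he ▸ hb)
        exact lt_of_le_of_lt (le_getLast_of_pairwise_lt hacc hb ha) (lt_of_le_of_ne hbx hbne)
      have hacc' : (acc ++ [x]).Pairwise (· < ·) := by
        rw [List.pairwise_append]
        exact ⟨hacc, List.pairwise_singleton _ _, fun a ha b hb => (List.mem_singleton.mp hb) ▸ hlt a ha⟩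
      have ⟨h1, h2⟩ := ih (acc ++ [x]) hacc' ht (by
        intro b hb z hz
        rw [List.getLast?_concat] at hb
        exact (Option.some_inj.mp hb) ▸ hx z hz)
      refine ⟨h1, fun y => ?_⟩
      rw [h2 y]
      simp only [List.mem_append, List.mem_cons]
      tauto
    · rw [if_neg hc]
      rw [not_or, not_not] at hc
      have hxm : x ∈ acc := List.mem_of_getLast? hc.2
      have ⟨h1, h2⟩ := ih acc hacc ht (by
        intro b hb z hz
        rw [hc.2] at hb
        exact (Option.some_inj.mp hb) ▸ hx z hz)
      refine ⟨h1, fun y => ?_⟩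
      rw [h2 y]
      simp only [List.mem_cons]
      constructor
      · rintro (h | h)
        · exact Or.inl h
        · exact Or.inr (Or.inr h)
      · rintro (h | rfl | h)
        · exact Or.inl h
        · exact Or.inl hxm
        · exact Or.inr h

-- ===== VERDICT (by name: the statement is the Claim_ definition above) =====
theorem findIngredients_spec : Claim_equal_findIngredients := by
  intro data _
  unfold Spec_findIngredients findIngredients findIngredients_alt
  have hA : data.foldl (fun allIngredients recipe =>
      match (PySem.Dict.mk recipe).get? "ingredients" with
      | some ings =>
          if ings ≠ [] then
            ings.foldl (fun s ingredient =>
              PySem.Set.add s (pyCapitalize (PySem.Str.lower ingredient))) allIngredients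
          else allIngredients
      | none => allIngredients) PySem.Set.empty = data.foldl aStep PySem.Set.empty := rfl
  have hB : data.foldl (fun items recipe =>
      match (PySem.Dict.mk recipe).get? "ingredients" with
      | some ings =>
          if ings ≠ [] then
            ings.foldl (fun acc ingredient =>
              acc ++ [pyCapitalize (PySem.Str.lower ingredient)]) items
          else items
      | none => items) [] = data.foldl bStep [] := rfl
  rw [hA, hB, bitems_eq data []]
  simp only [List.nil_append]
  set S := data.foldl aStep PySem.Set.empty with hS
  set g := PySem.List.sorted (pvFlat data) (fun x => x) false with hg
  have hgpw : g.Pairwise (· ≤ ·) := by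
    have := PySem.List.sorted_pairwise (xs := pvFlat data) (key := fun x => x)
    simpa using this
  obtain ⟨hpw, hmem⟩ := adjFold_spec g [] (List.Pairwise.nil) hgpw (by simp)
  apply PySem.List.sorted_eq_of_perm_of_pairwise_lt
  · rw [List.perm_ext_iff_of_nodup (hpw.imp ne_of_lt) (aset_nodup data PySem.Set.empty List.nodup_nil)]
    intro y
    rw [hmem y, aset_mem data PySem.Set.empty y]
    simp [hg, PySem.List.mem_sorted, PySem.Set.empty]
  · simpa using hpw
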